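-- pv_equiv track=rewrite | github.com/BadWolf1509/licitafacil | backend/services/description_fixer.py | _filter_candidates_by_page
-- ===== SOURCE A (Python) =====
-- from typing import Dict, List, Optional, Tuple
--
-- def _filter_candidates_by_page(
--     candidates: List[Dict],
--     servico_page: Optional[int],
--     line_to_page: Optional[Dict[int, int]],
--     max_page_distance: int = 2
-- ) -> List[Dict]:
--     """
--     Filtra candidatos para incluir apenas linhas da mesma página ou páginas próximas.
--
--     Prioridade:
--     1. Candidatos na mesma página
--     2. Candidatos em páginas próximas (±max_page_distance)
--     3. Lista vazia se todos os candidatos estão muito distantes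
--
--     Args:
--         candidates: Lista de candidatos
--         servico_page: Página do serviço (se disponível)
--         line_to_page: Mapeamento linha -> página
--         max_page_distance: Distância máxima de páginas permitida
--
--     Returns:
--         Lista filtrada de candidatos
--     """
--     if not servico_page or not line_to_page:
--         return candidates
--
--     # Primeiro: tentar candidatos na mesma página
--     same_page = [
--         c for c in candidates
--         if line_to_page.get(c['linha']) == servico_page
--     ]
--     if same_page:
--         return same_page
--
--     # Segundo: aceitar candidatos em páginas próximas
--     nearby = [
--         c for c in candidates
--         if abs(line_to_page.get(c['linha'], 0) - servico_page) <= max_page_distance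
--     ]
--     if nearby:
--         return nearby
--
--     # Terceiro: rejeitar candidatos muito distantes (retornar lista vazia)
--     # Isso força o sistema a manter a descrição original ao invés de usar uma errada
--     return []
-- ===== SOURCE B (Python) =====
-- def _filter_candidates_by_page(candidates, servico_page, line_to_page, max_page_distance=2):
--     if not servico_page or not line_to_page:
--         return candidates
--
--     def tier(c):
--         p = line_to_page.get(c['linha'])
--         if p == servico_page:
--             return 0
--         if abs((0 if p is None else p) - servico_page) <= max_page_distance:
--             return 1
--         return 2
--
--     tiers = [tier(c) for c in candidates]
--     best = min(tiers, default=2)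
--     if best == 2:
--         return []
--     return [c for c, t in zip(candidates, tiers) if t == best]
-- ===== Notes on version B (the rewrite author's own statement) =====
-- stated objective: alternative
-- what changed: Replaces A's staged filter-then-fallback passes by a best-tier selection: each candidate is scored once into a tier (0 same page, 1 nearby, 2 far), the minimum tier is taken, and the candidates of that tier are returned (tier 2 means none).
import Mathlib
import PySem

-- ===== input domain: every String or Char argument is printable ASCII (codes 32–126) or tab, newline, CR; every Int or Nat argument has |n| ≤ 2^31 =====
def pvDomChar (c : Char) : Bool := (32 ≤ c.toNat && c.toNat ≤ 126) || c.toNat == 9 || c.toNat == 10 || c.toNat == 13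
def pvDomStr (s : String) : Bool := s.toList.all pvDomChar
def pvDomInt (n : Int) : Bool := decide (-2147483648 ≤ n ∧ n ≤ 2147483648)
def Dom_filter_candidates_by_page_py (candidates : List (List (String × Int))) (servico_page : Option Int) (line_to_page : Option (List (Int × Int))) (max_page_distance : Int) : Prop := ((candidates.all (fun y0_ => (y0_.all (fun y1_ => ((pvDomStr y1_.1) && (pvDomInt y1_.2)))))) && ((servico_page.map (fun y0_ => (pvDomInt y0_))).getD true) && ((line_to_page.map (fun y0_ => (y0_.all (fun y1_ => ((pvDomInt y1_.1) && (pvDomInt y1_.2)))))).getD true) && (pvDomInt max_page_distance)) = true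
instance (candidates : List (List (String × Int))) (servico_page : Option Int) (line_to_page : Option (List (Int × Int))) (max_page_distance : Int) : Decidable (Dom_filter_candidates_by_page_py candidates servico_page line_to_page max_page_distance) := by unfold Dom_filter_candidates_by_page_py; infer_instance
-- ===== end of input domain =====

-- B replaces A's staged filter-then-fallback passes by a best-tier selection (score each
-- candidate once into tier 0/1/2, take the minimum tier, return that tier's candidates);
-- alternative decomposition, same cost.

-- ===== PORT A =====
-- shared helper: Python's `not servico_page or not line_to_page` (None/0 and None/{} are falsy)
def pvGuard (servico_page : Option Int) (line_to_page : Option (List (Int × Int))) : Bool :=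
  servico_page == none || servico_page == some 0 || line_to_page == none || line_to_page == some []

-- c['linha'] raises KeyError when the key is missing; Pre_ excludes that input, so getD 0 is never the default there
def pvLinha (c : List (String × Int)) : Int := (PySem.Dict.mk c).getD "linha" 0

def filter_candidates_by_page_py (candidates : List (List (String × Int))) (servico_page : Option Int) (line_to_page : Option (List (Int × Int))) (max_page_distance : Int) : List (List (String × Int)) :=
  if pvGuard servico_page line_to_page then candidates
  else
    let page := servico_page.getD 0
    let m := PySem.Dict.mk (line_to_page.getD [])
    let same_page := candidates.filter (fun c => m.get? (pvLinha c) == some page)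
    if same_page ≠ [] then same_page
    else
      let nearby := candidates.filter (fun c => |m.getD (pvLinha c) 0 - page| ≤ max_page_distance)
      if nearby ≠ [] then nearby else []

-- ===== PORT B =====
-- B's local `def tier(c)`: 0 = same page, 1 = nearby, 2 = far
def pvTier (m : PySem.Dict Int Int) (page d : Int) (c : List (String × Int)) : Int :=
  if m.get? (pvLinha c) == some page then 0
  else if |((m.get? (pvLinha c)).getD 0) - page| ≤ d then 1
  else 2

def filter_candidates_by_page_py_alt (candidates : List (List (String × Int))) (servico_page : Option Int) (line_to_page : Option (List (Int × Int))) (max_page_distance : Int) : List (List (String × Int)) :=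
  if pvGuard servico_page line_to_page then candidates
  else
    let page := servico_page.getD 0
    let m := PySem.Dict.mk (line_to_page.getD [])
    let tiers := candidates.map (pvTier m page max_page_distance)
    let best := (PySem.List.min? tiers (fun x => x)).getD 2   -- min(tiers, default=2)
    if best == 2 then []
    else ((candidates.zip tiers).filter (fun ct => ct.2 == best)).map Prod.fst

-- ===== PRECONDITION & SPEC =====
-- Pre_ excludes only inputs where A raises KeyError: when the guard does not short-circuit,
-- every candidate dict must contain the key "linha".
def Pre_filter_candidates_by_page_py (candidates : List (List (String × Int))) (servico_page : Option Int) (line_to_page : Option (List (Int × Int))) (max_page_distance : Int) : Prop :=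
  pvGuard servico_page line_to_page = false → ∀ c ∈ candidates, (PySem.Dict.mk c).contains "linha" = true
instance (candidates : List (List (String × Int))) (servico_page : Option Int) (line_to_page : Option (List (Int × Int))) (max_page_distance : Int) : Decidable (Pre_filter_candidates_by_page_py candidates servico_page line_to_page max_page_distance) := by unfold Pre_filter_candidates_by_page_py; infer_instance

def pvWitness_filter_candidates_by_page_py : (List (List (String × Int))) × Option Int × (Option (List (Int × Int))) × Int :=
  ([[("linha", 1)], [("linha", 2)]], some 1, some [(1, 1), (2, 4)], 2)

def Spec_filter_candidates_by_page_py (candidates : List (List (String × Int))) (servico_page : Option Int) (line_to_page : Option (List (Int × Int))) (max_page_distance : Int) (out : List (List (String × Int))) : Prop := out = filter_candidates_by_page_py_alt candidates servico_page line_to_page max_page_distance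
instance (candidates : List (List (String × Int))) (servico_page : Option Int) (line_to_page : Option (List (Int × Int))) (max_page_distance : Int) (out : List (List (String × Int))) : Decidable (Spec_filter_candidates_by_page_py candidates servico_page line_to_page max_page_distance out) := by unfold Spec_filter_candidates_by_page_py; infer_instance

-- ===== CLAIM (what is proved, stated in full; the proofs are below) =====
def Claim_equal_filter_candidates_by_page_py : Prop := ∀ (candidates : List (List (String × Int))) (servico_page : Option Int) (line_to_page : Option (List (Int × Int))) (max_page_distance : Int), Dom_filter_candidates_by_page_py candidates servico_page line_to_page max_page_distance → Pre_filter_candidates_by_page_py candidates servico_page line_to_page max_page_distance → Spec_filter_candidates_by_page_py candidates servico_page line_to_page max_page_distance (filter_candidates_by_page_py candidates servico_page line_to_page max_page_distance)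

-- ===== LEMMAS AND PROOFS =====

-- the tier function only takes the values 0, 1, 2
theorem pvTier_bounds (m : PySem.Dict Int Int) (page d : Int) (c : List (String × Int)) :
    0 ≤ pvTier m page d c ∧ pvTier m page d c ≤ 2 := by
  unfold pvTier; split_ifs <;> simp

theorem pvTier_eq_zero_iff (m : PySem.Dict Int Int) (page d : Int) (c : List (String × Int)) :
    pvTier m page d c = 0 ↔ (m.get? (pvLinha c) == some page) = true := by
  unfold pvTier; split_ifs with h1 h2 <;> simp_all

theorem pvTier_eq_one_of (m : PySem.Dict Int Int) (page d : Int) (c : List (String × Int))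
    (hP : ¬ (m.get? (pvLinha c) == some page) = true)
    (hQ : |(m.get? (pvLinha c)).getD 0 - page| ≤ d) :
    pvTier m page d c = 1 := by
  unfold pvTier; simp [hP, hQ]

theorem pvTier_eq_two_of (m : PySem.Dict Int Int) (page d : Int) (c : List (String × Int))
    (hP : ¬ (m.get? (pvLinha c) == some page) = true)
    (hQ : ¬ |(m.get? (pvLinha c)).getD 0 - page| ≤ d) :
    pvTier m page d c = 2 := by
  unfold pvTier; simp [hP, hQ]

-- the zip-with-tiers filter of B equals a plain filter on the tier value
theorem zip_map_filter_fst {α : Type} (f : α → Int) (b : Int) :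
    ∀ (l : List α),
      (((l.zip (l.map f)).filter (fun ct => ct.2 == b)).map Prod.fst)
        = l.filter (fun c => f c == b) := by
  intro l
  induction l with
  | nil => rfl
  | cons a t ih =>
    by_cases h : f a == b <;> simp [List.zip_cons_cons, h, ih]

-- ===== VERDICT (by name: the statement is the Claim_ definition above) =====
theorem filter_candidates_by_page_py_spec : Claim_equal_filter_candidates_by_page_py := by
  intro candidates servico_page line_to_page max_page_distance _ _
  unfold Spec_filter_candidates_by_page_py filter_candidates_by_page_py filter_candidates_by_page_py_alt
  by_cases hg : pvGuard servico_page line_to_page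
  · simp [hg]
  · simp only [hg, Bool.false_eq_true, if_neg, not_false_eq_true]
    set page := servico_page.getD 0 with hpage
    set m := PySem.Dict.mk (line_to_page.getD []) with hm
    set d := max_page_distance with hd
    set tiers := candidates.map (pvTier m page d) with htiers
    set best := (PySem.List.min? tiers (fun x => x)).getD 2 with hbest
    by_cases h0 : candidates.filter (fun c => m.get? (pvLinha c) == some page) = []
    · -- no same-page candidate: every tier ≥ 1
      have hnoP : ∀ c ∈ candidates, ¬ (m.get? (pvLinha c) == some page) = true := by
        intro c hc hP
        have : c ∈ candidates.filter (fun c => m.get? (pvLinha c) == some page) :=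
          List.mem_filter.mpr ⟨hc, hP⟩
        simp [h0] at this
      have htge1 : ∀ x ∈ tiers, (1 : Int) ≤ x := by
        intro x hx
        obtain ⟨c, hc, rfl⟩ := List.mem_map.mp hx
        have hb := pvTier_bounds m page d c
        have h0' := (pvTier_eq_zero_iff m page d c).not.mpr (hnoP c hc)
        omega
      by_cases h1 : candidates.filter (fun c => |m.getD (pvLinha c) 0 - page| ≤ d) = []
      · -- no nearby candidate either: every tier = 2, best = 2, both return []
        simp only [h0, h1, ne_eq, not_true_eq_false, if_false]
        have hall2 : ∀ x ∈ tiers, x = (2 : Int) := by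
          intro x hx
          obtain ⟨c, hc, rfl⟩ := List.mem_map.mp hx
          have hQ : ¬ |(m.get? (pvLinha c)).getD 0 - page| ≤ d := by
            intro hQ
            have : c ∈ candidates.filter (fun c => |m.getD (pvLinha c) 0 - page| ≤ d) := by
              refine List.mem_filter.mpr ⟨hc, ?_⟩
              simpa [PySem.Dict.getD_eq_get?_getD] using hQ
            simp [h1] at this
          exact pvTier_eq_two_of m page d c (hnoP c hc) hQ
        have hbest2 : best = 2 := by
          rw [hbest]
          rcases hmin : PySem.List.min? tiers (fun x => x) with _ | v
          · rfl
          · have hv := PySem.List.min?_mem hmin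
            simp [hall2 v hv]
        simp [hbest2]
      · -- a nearby candidate exists: best = 1, B's tier-1 filter = A's nearby filter
        obtain ⟨c1, hc1, hQ1⟩ :
            ∃ c ∈ candidates, |m.getD (pvLinha c) 0 - page| ≤ d := by
          rcases List.exists_mem_of_ne_nil _ h1 with ⟨c, hc⟩
          exact ⟨c, (List.mem_filter.mp hc).1, by
            have := (List.mem_filter.mp hc).2; simpa using this⟩
        have htc1 : pvTier m page d c1 = 1 := by
          refine pvTier_eq_one_of m page d c1 (hnoP c1 hc1) ?_
          simpa [PySem.Dict.getD_eq_get?_getD] using hQ1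
        have hbest1 : best = 1 := by
          rcases hmin : PySem.List.min? tiers (fun x => x) with _ | v
          · have hnil : candidates = [] := by
              simpa [htiers] using (PySem.List.min?_eq_none_iff _ _).mp hmin
            simp [hnil] at hc1
          · have hv := PySem.List.min?_mem hmin
            have hle := PySem.List.min?_isMin hmin (pvTier m page d c1)
              (List.mem_map.mpr ⟨c1, hc1, rfl⟩)
            simp only [htc1] at hle
            have hge := htge1 v hv
            simp [hbest, hmin]; omega
        have hb2 : (best == (2 : Int)) = false := by simp [hbest1]
        simp only [h0, ne_eq, not_true_eq_false, if_false, h1,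
          not_false_eq_true, if_true, hb2]
        rw [htiers, zip_map_filter_fst]
        refine (List.filter_congr ?_).symm
        intro c hc
        rw [hbest1]
        by_cases hQ : |m.getD (pvLinha c) 0 - page| ≤ d
        · have : pvTier m page d c = 1 := by
            refine pvTier_eq_one_of m page d c (hnoP c hc) ?_
            simpa [PySem.Dict.getD_eq_get?_getD] using hQ
          simp [hQ, this]
        · have : pvTier m page d c = 2 := by
            refine pvTier_eq_two_of m page d c (hnoP c hc) ?_
            intro h; exact hQ (by simpa [PySem.Dict.getD_eq_get?_getD] using h)
          simp [hQ, this]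
    · -- a same-page candidate exists: best = 0, B's tier-0 filter = A's same_page filter
      obtain ⟨c0, hc0⟩ := List.exists_mem_of_ne_nil _ h0
      have hc0m := (List.mem_filter.mp hc0).1
      have hP0 := (List.mem_filter.mp hc0).2
      have htc0 : pvTier m page d c0 = 0 := (pvTier_eq_zero_iff m page d c0).mpr hP0
      have hbest0 : best = 0 := by
        rcases hmin : PySem.List.min? tiers (fun x => x) with _ | v
        · have hnil : candidates = [] := by
            simpa [htiers] using (PySem.List.min?_eq_none_iff _ _).mp hmin
          simp [hnil] at hc0m
        · have hv := PySem.List.min?_mem hmin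
          obtain ⟨c, hc, rfl⟩ := List.mem_map.mp hv
          have hle := PySem.List.min?_isMin hmin (pvTier m page d c0)
            (List.mem_map.mpr ⟨c0, hc0m, rfl⟩)
          have hb := pvTier_bounds m page d c
          simp only [htc0] at hle
          simp [hbest, hmin]; omega
      have hb2 : (best == (2 : Int)) = false := by simp [hbest0]
      simp only [h0, ne_eq, not_false_eq_true, if_true, hb2, Bool.false_eq_true, if_false]
      rw [htiers, zip_map_filter_fst]
      refine (List.filter_congr ?_).symm
      intro c hc
      rw [hbest0]
      by_cases hP : (m.get? (pvLinha c) == some page) = true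
      · simp [hP, (pvTier_eq_zero_iff m page d c).mpr hP]
      · have hne : pvTier m page d c ≠ 0 := fun h => hP ((pvTier_eq_zero_iff m page d c).mp h)
        simp only [hP]
        simpa using hne
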